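-- pv_equiv track=rewrite | github.com/abhishekzgithub/ds-algo | leetcode/2119.py | isSameAfterReversals
-- ===== SOURCE A (Python) =====
-- def isSameAfterReversals(num):
--     """
--     :type num: int
--     :rtype: bool
--     """
--     new_num=str(num)
--     rev_num=""
--     for ele in range(len(new_num)-1,-1,-1):
--         rev_num+=new_num[ele]
--     #rev_num=int(rev_num)
--     new_rev_num=""
--     for ele in range(len(str(rev_num))-1,-1,-1):
--         new_rev_num+=rev_num[ele]
--     return rev_num,new_rev_num
-- ===== SOURCE B (Python) =====
-- def isSameAfterReversals(num):
--     s = str(num)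
--     rev = ""
--     for ch in s:
--         rev = ch + rev
--     return rev, s
-- ===== Notes on version B (the rewrite author's own statement) =====
-- stated objective: simpler
-- what changed: B reverses the digit string in one forward pass by prepending each character and returns the original string itself for the second component (reverse of a reverse is the identity), eliminating A's second index-based reversal loop.
import Mathlib
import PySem

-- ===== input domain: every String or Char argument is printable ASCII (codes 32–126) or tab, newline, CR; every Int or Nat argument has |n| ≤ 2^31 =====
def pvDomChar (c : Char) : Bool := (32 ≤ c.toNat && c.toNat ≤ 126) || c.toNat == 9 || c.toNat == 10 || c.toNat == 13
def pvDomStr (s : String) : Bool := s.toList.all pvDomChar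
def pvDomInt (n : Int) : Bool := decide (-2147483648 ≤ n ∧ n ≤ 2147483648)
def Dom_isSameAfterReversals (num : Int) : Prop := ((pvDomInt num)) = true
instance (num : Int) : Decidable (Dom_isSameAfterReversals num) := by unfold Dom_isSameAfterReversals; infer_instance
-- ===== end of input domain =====

-- B reverses str(num) in ONE forward pass (prepending each char) and returns the original
-- string for the second component, instead of A's two index-based reversal loops.

-- ===== PORT A =====
def isSameAfterReversals (num : Int) : String × String :=
  let newNum : List Char := (PySem.Int.toStr num).toList
  let revNum : List Char :=
    (PySem.List.pyRange ((newNum.length : Int) - 1) (-1) (-1)).foldl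
      (fun acc ele => acc ++ [PySem.List.pyGetD newNum ele ' ']) []
  let newRevNum : List Char :=
    (PySem.List.pyRange ((revNum.length : Int) - 1) (-1) (-1)).foldl
      (fun acc ele => acc ++ [PySem.List.pyGetD revNum ele ' ']) []
  (String.ofList revNum, String.ofList newRevNum)

-- ===== PORT B =====
def isSameAfterReversals_alt (num : Int) : String × String :=
  let s : List Char := (PySem.Int.toStr num).toList
  let rev : List Char := s.foldl (fun acc ch => [ch] ++ acc) []
  (String.ofList rev, String.ofList s)

-- ===== PRECONDITION & SPEC =====
def Spec_isSameAfterReversals (num : Int) (out : String × String) : Prop := out = isSameAfterReversals_alt num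
instance (num : Int) (out : String × String) : Decidable (Spec_isSameAfterReversals num out) := by unfold Spec_isSameAfterReversals; infer_instance

-- ===== CLAIM (what is proved, stated in full; the proofs are below) =====
def Claim_equal_isSameAfterReversals : Prop := ∀ (num : Int), Dom_isSameAfterReversals num → Spec_isSameAfterReversals num (isSameAfterReversals num)

-- ===== LEMMAS AND PROOFS =====

-- A's index-countdown loop over any list builds its reverse.
theorem revLoop_eq_reverse (l : List Char) :
    (PySem.List.pyRange ((l.length : Int) - 1) (-1) (-1)).foldl
      (fun acc ele => acc ++ [PySem.List.pyGetD l ele ' ']) [] = l.reverse := by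
  rw [PySem.List.pyRange_neg_one_eq_reverse]
  have h1 : ((l.length : Int) - 1 + 1) = (l.length : Int) := by ring
  have h0 : (-1 : Int) + 1 = 0 := by ring
  rw [h1, h0, List.foldl_reverse]
  have key : ∀ (r : List Int) (acc : List Char),
      r.foldr (fun x y => y ++ [PySem.List.pyGetD l x ' ']) acc
        = acc ++ (r.map (fun ele => PySem.List.pyGetD l ele ' ')).reverse := by
    intro r
    induction r with
    | nil => intro acc; simp
    | cons x xs ih => intro acc; simp [ih]
  rw [key, show ((l.length : Int)) = PySem.List.len l from rfl,
    PySem.List.map_pyGetD_pyRange_zero]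
  simp

-- B's prepend loop builds the reverse.
theorem prependLoop_eq_reverse (l : List Char) :
    l.foldl (fun acc ch => [ch] ++ acc) [] = l.reverse := by
  have key : ∀ acc : List Char, l.foldl (fun acc ch => [ch] ++ acc) acc = l.reverse ++ acc := by
    induction l with
    | nil => intro acc; simp
    | cons x xs ih => intro acc; rw [List.foldl_cons, ih]; simp
  rw [key]
  simp

-- ===== VERDICT (by name: the statement is the Claim_ definition above) =====
theorem isSameAfterReversals_spec : Claim_equal_isSameAfterReversals := by
  intro num _
  unfold Spec_isSameAfterReversals isSameAfterReversals isSameAfterReversals_alt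
  simp only [revLoop_eq_reverse, prependLoop_eq_reverse, List.reverse_reverse]
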